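-- pv_equiv track=rewrite | github.com/aaskorohodov/HardSkills | PATTERNS/Chain/Handlers.py | process_request
-- ===== SOURCE A (Python) =====
-- def process_request(request):
--     operators = {
--         '/': 0,
--         '*': 0,
--         '-': 0,
--         '+': 0
--     }
--
--     for operator in operators.keys():
--         for symbol in request:
--             if symbol == operator:
--                 operators[operator] += 1
--
--     for operator, count in operators.items():
--         if count > 1:
--             return f'Operator "{operator}" encountered more than once, which is not allowed!'
-- ===== SOURCE B (Python) =====
-- def process_request(request):
--     counts = {}
--     for symbol in request:
--         counts[symbol] = counts.get(symbol, 0) + 1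
--     for operator in '/*-+':
--         if counts.get(operator, 0) > 1:
--             return f'Operator "{operator}" encountered more than once, which is not allowed!'
-- ===== Notes on version B (the rewrite author's own statement) =====
-- stated objective: idiomatic
-- what changed: One tally pass over the string building a count dict, then a check of the four operators in fixed order, replacing A's four separate scans of the string into a preset dict.
import Mathlib
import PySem

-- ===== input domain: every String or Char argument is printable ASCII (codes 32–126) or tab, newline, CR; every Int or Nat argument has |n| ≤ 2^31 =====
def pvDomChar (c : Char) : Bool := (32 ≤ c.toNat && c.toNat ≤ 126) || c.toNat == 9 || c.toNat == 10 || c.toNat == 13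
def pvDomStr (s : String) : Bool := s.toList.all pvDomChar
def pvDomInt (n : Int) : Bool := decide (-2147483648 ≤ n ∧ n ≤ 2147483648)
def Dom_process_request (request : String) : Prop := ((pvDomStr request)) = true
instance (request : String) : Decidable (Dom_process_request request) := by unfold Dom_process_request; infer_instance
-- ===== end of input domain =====

-- B replaces A's four separate scans of the string with one tally pass building a
-- count dict, then checks the four operators in the same fixed order (idiomatic).

-- the f-string both Pythons build
def pvErr (op : Char) : String :=
  "Operator \"" ++ String.ofList [op] ++ "\" encountered more than once, which is not allowed!"

-- ===== PORT A =====
def process_request (request : String) : Option String :=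
  let operators : PySem.Dict Char Int :=
    ((((PySem.Dict.empty.insert '/' 0).insert '*' 0).insert '-' 0).insert '+' 0)
  -- for operator in operators.keys(): for symbol in request: if symbol == operator: operators[operator] += 1
  let operators :=
    (PySem.Dict.keys operators).foldl (fun d op =>
      request.toList.foldl (fun d sym =>
        if sym == op then d.modify op 0 (· + 1) else d) d) operators
  -- for operator, count in operators.items(): if count > 1: return f'…'
  operators.items.findSome? (fun p => if p.2 > 1 then some (pvErr p.1) else none)

-- ===== PORT B =====
def process_request_alt (request : String) : Option String :=
  let counts : PySem.Dict Char Int :=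
    request.toList.foldl (fun d c => d.insert c (d.getD c 0 + 1)) PySem.Dict.empty
  "/*-+".toList.findSome? (fun op =>
    if counts.getD op 0 > 1 then some (pvErr op) else none)

-- ===== PRECONDITION & SPEC =====
def Spec_process_request (request : String) (out : Option String) : Prop := out = process_request_alt request
instance (request : String) (out : Option String) : Decidable (Spec_process_request request out) := by unfold Spec_process_request; infer_instance

-- ===== CLAIM (what is proved, stated in full; the proofs are below) =====
def Claim_equal_process_request : Prop := ∀ (request : String), Dom_process_request request → Spec_process_request request (process_request request)

-- ===== LEMMAS AND PROOFS =====

-- A's inner loop over the string, read back through getD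
theorem pvA_inner_getD (l : List Char) (op k : Char) (d : PySem.Dict Char Int) :
    ((l.foldl (fun d sym => if sym == op then d.modify op 0 (· + 1) else d) d).getD k 0)
      = d.getD k 0 + (if k = op then (l.count op : Int) else 0) := by
  induction l generalizing d with
  | nil => simp
  | cons c l ih =>
    simp only [List.foldl_cons]
    by_cases hc : c = op
    · subst hc
      simp only [BEq.rfl, if_true]
      rw [ih, PySem.Dict.getD_modify]
      split_ifs with hk
      · subst hk; rw [List.count_cons_self]; push_cast; ring
      · ring
    · simp only [show (c == op) = false by simp [hc], Bool.false_eq_true, if_false]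
      rw [ih]
      simp [hc]

-- A's inner loop does not change the key list when op is already a key
theorem pvA_inner_keys (l : List Char) (op : Char) (d : PySem.Dict Char Int)
    (h : op ∈ d.keys) :
    ((l.foldl (fun d sym => if sym == op then d.modify op 0 (· + 1) else d) d).keys)
      = d.keys := by
  induction l generalizing d with
  | nil => rfl
  | cons c l ih =>
    simp only [List.foldl_cons]
    have hcont : d.contains op = true := (PySem.Dict.contains_iff_mem_keys d op).mpr h
    by_cases hc : c = op
    · subst hc
      simp only [BEq.rfl, if_true]
      have hk : (d.modify c 0 (· + 1)).keys = d.keys := by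
        rw [PySem.Dict.keys_modify, PySem.Dict.keys_insert_of_contains _ _ hcont]
      rw [ih _ (by rw [hk]; exact h), hk]
    · simp only [show (c == op) = false by simp [hc], Bool.false_eq_true, if_false]
      exact ih _ h

theorem process_request_eq_alt (request : String) :
    process_request request = process_request_alt request := by
  unfold process_request process_request_alt
  dsimp only
  set l := request.toList with hl
  have hB : ∀ op : Char,
      (l.foldl (fun d c => d.insert c (d.getD c 0 + 1)) PySem.Dict.empty).getD op 0
        = (l.count op : Int) := by
    intro op
    rw [PySem.Dict.getD_foldl_insert_add_one]
    simp
  set d0 : PySem.Dict Char Int :=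
    ((((PySem.Dict.empty.insert '/' 0).insert '*' 0).insert '-' 0).insert '+' 0) with hd0
  set step := fun (d : PySem.Dict Char Int) (op : Char) =>
      l.foldl (fun d sym => if sym == op then d.modify op 0 (· + 1) else d) d with hstep
  have hkeys0 : d0.keys = ['/', '*', '-', '+'] := by decide
  have k1 : (step d0 '/').keys = d0.keys := pvA_inner_keys _ _ _ (by rw [hkeys0]; decide)
  have k2 : (step (step d0 '/') '*').keys = d0.keys := by
    rw [pvA_inner_keys _ _ _ (by rw [k1, hkeys0]; decide), k1]
  have k3 : (step (step (step d0 '/') '*') '-').keys = d0.keys := by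
    rw [pvA_inner_keys _ _ _ (by rw [k2, hkeys0]; decide), k2]
  have hD : (PySem.Dict.keys d0).foldl step d0
      = step (step (step (step d0 '/') '*') '-') '+' := by
    rw [hkeys0]; rfl
  set D := step (step (step (step d0 '/') '*') '-') '+' with hDdef
  have k4 : D.keys = d0.keys := by
    rw [hDdef, pvA_inner_keys _ _ _ (by rw [k3, hkeys0]; decide), k3]
  have hnd : D.keys.Nodup := by rw [k4, hkeys0]; decide
  have hg : ∀ k : Char, D.getD k 0
      = d0.getD k 0 + ((if k = '/' then (l.count '/' : Int) else 0)
        + (if k = '*' then (l.count '*' : Int) else 0)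
        + (if k = '-' then (l.count '-' : Int) else 0)
        + (if k = '+' then (l.count '+' : Int) else 0)) := by
    intro k
    rw [hDdef, hstep]
    simp only
    rw [pvA_inner_getD, pvA_inner_getD, pvA_inner_getD, pvA_inner_getD]
    ring
  have g1 : D.getD '/' 0 = (l.count '/' : Int) := by
    rw [hg, show d0.getD '/' 0 = 0 from by decide, if_pos rfl, if_neg (by decide), if_neg (by decide), if_neg (by decide)]; ring
  have g2 : D.getD '*' 0 = (l.count '*' : Int) := by
    rw [hg, show d0.getD '*' 0 = 0 from by decide, if_pos rfl, if_neg (by decide), if_neg (by decide), if_neg (by decide)]; ring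
  have g3 : D.getD '-' 0 = (l.count '-' : Int) := by
    rw [hg, show d0.getD '-' 0 = 0 from by decide, if_pos rfl, if_neg (by decide), if_neg (by decide), if_neg (by decide)]; ring
  have g4 : D.getD '+' 0 = (l.count '+' : Int) := by
    rw [hg, show d0.getD '+' 0 = 0 from by decide, if_pos rfl, if_neg (by decide), if_neg (by decide), if_neg (by decide)]; ring
  rw [hD, PySem.Dict.items_eq_map_keys D hnd 0, k4, hkeys0,
    show ("/*-+".toList) = ['/', '*', '-', '+'] from rfl]
  simp only [List.map_cons, List.map_nil, List.findSome?_cons, List.findSome?_nil,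
    g1, g2, g3, g4, hB]

-- ===== VERDICT (by name: the statement is the Claim_ definition above) =====
theorem process_request_spec : Claim_equal_process_request := by
  intro request _
  unfold Spec_process_request
  exact process_request_eq_alt request
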